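-- pv_equiv track=rewrite | github.com/sigurdvaa/adventofcode | 2018/20-A-Regular-Map.py | walk_paths
-- ===== SOURCE A (Python) =====
-- def walk_paths(pattern: str, min_distance: int):
--     Point = tuple[int, int]
--     pattern = pattern[1:-1]
--     head: Point = (0, 0)
--     heads: list[Point] = []
--     rooms: set[Point] = set([head])
--     doors: set[Point] = set()
--
--     traveled_head: int = 0
--     traveled: list[int] = []
--     rooms_min_dist: set[Point] = set()
--
--     i: int = 0
--     while i < len(pattern):
--         if pattern[i] in "NSWE":
--             if pattern[i] == "N":
--                 door = (head[0], head[1] - 1)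
--                 room = (head[0], head[1] - 2)
--             elif pattern[i] == "S":
--                 door = (head[0], head[1] + 1)
--                 room = (head[0], head[1] + 2)
--             elif pattern[i] == "W":
--                 door = (head[0] - 1, head[1])
--                 room = (head[0] - 2, head[1])
--             elif pattern[i] == "E":
--                 door = (head[0] + 1, head[1])
--                 room = (head[0] + 2, head[1])
--             doors.add(door)
--             rooms.add(room)
--             head = room
--             traveled_head += 1
--             if traveled_head >= min_distance:
--                 rooms_min_dist.add(room)
--         elif pattern[i] == "(":
--             heads.append(head)
--             traveled.append(traveled_head)
--         elif pattern[i] == ")":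
--             heads.pop()
--             traveled.pop()
--         elif pattern[i] == "|":
--             head = heads[-1]
--             traveled_head = traveled[-1]
--         else:
--             assert False, "unreachable"
--         i += 1
--     return len(rooms_min_dist)
-- ===== SOURCE B (Python) =====
-- def walk_paths(pattern: str, min_distance: int):
--     # Recursive-descent interpreter over the inner pattern (no explicit stacks):
--     # a sequence is moves and parenthesised groups; a group is '|'-separated
--     # alternatives, each replayed from the snapshot taken at '('; after the
--     # group the state is the one the last alternative left (no restore),
--     # matching the map's semantics.
--     inner = pattern[1:-1]
--     n = len(inner)
--     deltas = {"N": (0, -2), "S": (0, 2), "W": (-2, 0), "E": (2, 0)}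
--     rooms_min_dist = set()
--
--     def run(i, x, y, d):
--         # Process from i until an unmatched ')' / '|' or the end; returns
--         # (stop index, final head x, y, final distance d).
--         while i < n:
--             c = inner[i]
--             if c in deltas:
--                 dx, dy = deltas[c]
--                 x += dx
--                 y += dy
--                 d += 1
--                 if d >= min_distance:
--                     rooms_min_dist.add((x, y))
--                 i += 1
--             elif c == "(":
--                 sx, sy, sd = x, y, d
--                 j = i + 1
--                 while True:
--                     j, x, y, d = run(j, sx, sy, sd)
--                     if j < n and inner[j] == "|":
--                         j += 1
--                     else:
--                         break
--                 if j < n and inner[j] == ")":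
--                     i = j + 1
--                 else:
--                     return (j, x, y, d)
--             else:
--                 break
--         return (i, x, y, d)
--
--     run(0, 0, 0, 0)
--     return len(rooms_min_dist)
-- ===== Notes on version B (the rewrite author's own statement) =====
-- stated objective: alternative
-- what changed: A's single index loop with explicit head/traveled stacks is replaced by a recursive-descent interpreter over the inner pattern: a group is walked by replaying each '|'-alternative from the snapshot taken at '(', so the stacks disappear; same cost (one pass over the pattern).
import Mathlib
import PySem

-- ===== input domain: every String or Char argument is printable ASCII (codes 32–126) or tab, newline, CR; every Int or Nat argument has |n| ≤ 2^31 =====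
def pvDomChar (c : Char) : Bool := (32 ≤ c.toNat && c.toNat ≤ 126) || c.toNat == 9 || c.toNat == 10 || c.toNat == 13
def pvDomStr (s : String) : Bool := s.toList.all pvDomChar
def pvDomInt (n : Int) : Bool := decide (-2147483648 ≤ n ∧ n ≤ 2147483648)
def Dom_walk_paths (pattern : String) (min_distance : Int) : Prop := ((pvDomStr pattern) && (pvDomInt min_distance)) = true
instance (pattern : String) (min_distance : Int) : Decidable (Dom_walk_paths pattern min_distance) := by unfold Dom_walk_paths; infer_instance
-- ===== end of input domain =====

-- B replaces A's explicit head/distance stacks and index loop by a recursive-descent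
-- interpreter over the same inner pattern (alternative decomposition, same cost).

abbrev Pt := Int × Int

-- ===== PORT A =====  (stack machine: index loop over the inner pattern with explicit
-- heads/traveled stacks; ported as structural recursion over the char list, with the
-- same state; Option = Python exception: IndexError on pop/[-1] of an empty stack,
-- AssertionError on any other character)
structure StA where
  head : Pt
  heads : List Pt
  rooms : PySem.Set Pt
  doors : PySem.Set Pt
  traveled_head : Int
  traveled : List Int
  rooms_min_dist : PySem.Set Pt
  deriving Repr, DecidableEq

def stepA (md : Int) (c : Char) (s : StA) : Option StA :=
  if c = 'N' ∨ c = 'S' ∨ c = 'W' ∨ c = 'E' then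
    let dr : Pt × Pt :=
      if c = 'N' then ((s.head.1, s.head.2 - 1), (s.head.1, s.head.2 - 2))
      else if c = 'S' then ((s.head.1, s.head.2 + 1), (s.head.1, s.head.2 + 2))
      else if c = 'W' then ((s.head.1 - 1, s.head.2), (s.head.1 - 2, s.head.2))
      else ((s.head.1 + 1, s.head.2), (s.head.1 + 2, s.head.2))
    let t := s.traveled_head + 1
    some { head := dr.2, heads := s.heads,
           rooms := PySem.Set.add s.rooms dr.2, doors := PySem.Set.add s.doors dr.1,
           traveled_head := t, traveled := s.traveled,
           rooms_min_dist := if t ≥ md then PySem.Set.add s.rooms_min_dist dr.2 else s.rooms_min_dist }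
  else if c = '(' then
    some { s with heads := s.heads ++ [s.head], traveled := s.traveled ++ [s.traveled_head] }
  else if c = ')' then
    match PySem.List.pop? s.heads (-1), PySem.List.pop? s.traveled (-1) with
    | some (_, hs), some (_, ts) => some { s with heads := hs, traveled := ts }
    | _, _ => none
  else if c = '|' then
    match PySem.List.pyGet? s.heads (-1), PySem.List.pyGet? s.traveled (-1) with
    | some h, some t => some { s with head := h, traveled_head := t }
    | _, _ => none
  else none

def runA (md : Int) : List Char → StA → Option StA
  | [], s => some s
  | c :: cs, s =>
    match stepA md c s with
    | some s' => runA md cs s'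
    | none => none

def walk_paths (pattern : String) (min_distance : Int) : Int :=
  let cs := PySem.List.slice pattern.toList (some 1) (some (-1))
  match runA min_distance cs
      { head := (0, 0), heads := [], rooms := PySem.Set.ofList [(0, 0)],
        doors := PySem.Set.empty, traveled_head := 0, traveled := [],
        rooms_min_dist := PySem.Set.empty } with
  | some s => PySem.Set.len s.rooms_min_dist
  | none => 0   -- unreached under Pre_: Python raises here

-- ===== PORT B =====  (recursive-descent interpreter; fuel only makes the
-- well-founded recursion structural — 2·len+2 is always enough under Pre_)
structure StB where
  head : Pt
  d : Int
  rmd : PySem.Set Pt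
  deriving Repr, DecidableEq

def isMove (c : Char) : Bool := c = 'N' || c = 'S' || c = 'W' || c = 'E'

def delta (c : Char) : Pt :=
  if c = 'N' then (0, -2) else if c = 'S' then (0, 2)
  else if c = 'W' then (-2, 0) else (2, 0)

mutual
def runB (md : Int) (fuel : Nat) (cs : List Char) (st : StB) : Option (List Char × StB) :=
  match fuel with
  | 0 => none
  | f + 1 =>
    match cs with
    | [] => some ([], st)
    | c :: rest =>
      if isMove c then
        let dxy := delta c
        let h : Pt := (st.head.1 + dxy.1, st.head.2 + dxy.2)
        let d := st.d + 1
        runB md f rest { head := h, d := d,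
                         rmd := if d ≥ md then PySem.Set.add st.rmd h else st.rmd }
      else if c = '(' then
        runAlts md f rest (st.head, st.d) st.rmd
      else
        some (c :: rest, st)

def runAlts (md : Int) (fuel : Nat) (cs : List Char) (snap : Pt × Int)
    (rmd : PySem.Set Pt) : Option (List Char × StB) :=
  match fuel with
  | 0 => none
  | f + 1 =>
    match runB md f cs { head := snap.1, d := snap.2, rmd := rmd } with
    | none => none
    | some (rest, st') =>
      match rest with
      | '|' :: r => runAlts md f r snap st'.rmd
      | ')' :: r => runB md f r st'
      | _ => some (rest, st')
end

def walk_paths_alt (pattern : String) (min_distance : Int) : Int :=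
  let cs := PySem.List.slice pattern.toList (some 1) (some (-1))
  match runB min_distance (2 * cs.length + 2) cs { head := (0, 0), d := 0, rmd := PySem.Set.empty } with
  | some (_, st) => PySem.Set.len st.rmd
  | none => 0   -- unreached: the fuel suffices

-- ===== PRECONDITION & SPEC =====
-- okPat cs dep: the inner pattern uses only N/S/W/E/(/|/), every ')' closes an open '('
-- and every '|' sits inside one (dep = currently open groups). Exactly where A returns:
-- elsewhere A raises AssertionError (foreign character) or IndexError (pop/[-1] on the
-- empty stack). A does NOT require open groups to be closed, and neither does okPat.
def okPat : List Char → Nat → Bool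
  | [], _ => true
  | c :: cs, dep =>
    if c = 'N' ∨ c = 'S' ∨ c = 'W' ∨ c = 'E' then okPat cs dep
    else if c = '(' then okPat cs (dep + 1)
    else if c = ')' then dep != 0 && okPat cs (dep - 1)
    else if c = '|' then dep != 0 && okPat cs dep
    else false

def Pre_walk_paths (pattern : String) (min_distance : Int) : Prop :=
  okPat (PySem.List.slice pattern.toList (some 1) (some (-1))) 0 = true

instance (pattern : String) (min_distance : Int) : Decidable (Pre_walk_paths pattern min_distance) := by
  unfold Pre_walk_paths; infer_instance

def pvWitness_walk_paths : String × Int := ("^(NE|SW)N$", 2)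

def Spec_walk_paths (pattern : String) (min_distance : Int) (out : Int) : Prop := out = walk_paths_alt pattern min_distance
instance (pattern : String) (min_distance : Int) (out : Int) : Decidable (Spec_walk_paths pattern min_distance out) := by unfold Spec_walk_paths; infer_instance

-- ===== CLAIM (what is proved, stated in full; the proofs are below) =====
def Claim_equal_walk_paths : Prop := ∀ (pattern : String) (min_distance : Int), Dom_walk_paths pattern min_distance → Pre_walk_paths pattern min_distance → Spec_walk_paths pattern min_distance (walk_paths pattern min_distance)

-- ===== LEMMAS AND PROOFS =====

def doorA (c : Char) (h : Pt) : Pt :=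
  if c = 'N' then (h.1, h.2 - 1) else if c = 'S' then (h.1, h.2 + 1)
  else if c = 'W' then (h.1 - 1, h.2) else (h.1 + 1, h.2)

theorem stepA_move (md : Int) (c : Char) (h : Pt) (hs : List Pt) (rooms doors : PySem.Set Pt)
    (t : Int) (ts : List Int) (rmd : PySem.Set Pt)
    (hm : c = 'N' ∨ c = 'S' ∨ c = 'W' ∨ c = 'E') :
    stepA md c ⟨h, hs, rooms, doors, t, ts, rmd⟩ =
      some ⟨(h.1 + (delta c).1, h.2 + (delta c).2), hs,
            PySem.Set.add rooms (h.1 + (delta c).1, h.2 + (delta c).2),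
            PySem.Set.add doors (doorA c h), t + 1, ts,
            if t + 1 ≥ md then PySem.Set.add rmd (h.1 + (delta c).1, h.2 + (delta c).2) else rmd⟩ := by
  rcases hm with rfl | rfl | rfl | rfl
  · have hp : ((h.1 + (delta 'N').1, h.2 + (delta 'N').2) : Pt) = (h.1, h.2 - 2) := by
      simp [delta, Prod.ext_iff]; omega
    rw [hp]; simp [stepA, doorA]
  · have hp : ((h.1 + (delta 'S').1, h.2 + (delta 'S').2) : Pt) = (h.1, h.2 + 2) := by
      simp [delta]
    rw [hp]; simp [stepA, doorA]
  · have hp : ((h.1 + (delta 'W').1, h.2 + (delta 'W').2) : Pt) = (h.1 - 2, h.2) := by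
      simp [delta, Prod.ext_iff]; omega
    rw [hp]; simp [stepA, doorA]
  · have hp : ((h.1 + (delta 'E').1, h.2 + (delta 'E').2) : Pt) = (h.1 + 2, h.2) := by
      simp [delta]
    rw [hp]; simp [stepA, doorA]

theorem stepA_open (md : Int) (h : Pt) (hs : List Pt) (rooms doors : PySem.Set Pt)
    (t : Int) (ts : List Int) (rmd : PySem.Set Pt) :
    stepA md '(' ⟨h, hs, rooms, doors, t, ts, rmd⟩ =
      some ⟨h, hs ++ [h], rooms, doors, t, ts ++ [t], rmd⟩ := by
  simp [stepA]

theorem stepA_close (md : Int) (h a : Pt) (hs : List Pt) (rooms doors : PySem.Set Pt)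
    (t b : Int) (ts : List Int) (rmd : PySem.Set Pt) :
    stepA md ')' ⟨h, hs ++ [a], rooms, doors, t, ts ++ [b], rmd⟩ =
      some ⟨h, hs, rooms, doors, t, ts, rmd⟩ := by
  simp [stepA, PySem.List.pop?_last]

theorem stepA_bar (md : Int) (h a : Pt) (hs : List Pt) (rooms doors : PySem.Set Pt)
    (t b : Int) (ts : List Int) (rmd : PySem.Set Pt) :
    stepA md '|' ⟨h, hs ++ [a], rooms, doors, t, ts ++ [b], rmd⟩ =
      some ⟨a, hs ++ [a], rooms, doors, b, ts ++ [b], rmd⟩ := by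
  simp [stepA, PySem.List.pyGet?_neg_one_append_singleton]

-- Simulation statements: SeqP f — runB on a well-formed tail succeeds, stops at [] or at a
-- top-level ')'/'|', and A's stack machine run over the consumed prefix reaches B's state
-- with its stacks untouched; AltsP f — same across a whole group ('(' already pushed by A).
def SeqP (md : Int) (f : Nat) : Prop :=
  ∀ (cs : List Char) (st : StB) (d : Nat),
    okPat cs d = true → 2 * cs.length + 1 ≤ f →
    ∃ rest st', runB md f cs st = some (rest, st')
      ∧ rest.length ≤ cs.length
      ∧ okPat rest d = true
      ∧ (rest = [] ∨ (d ≠ 0 ∧ ∃ r, rest = ')' :: r ∨ rest = '|' :: r))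
      ∧ ∀ (hs : List Pt) (ts : List Int) (rooms doors : PySem.Set Pt),
          ∃ rooms' doors' hs' ts',
            runA md cs ⟨st.head, hs, rooms, doors, st.d, ts, st.rmd⟩
              = runA md rest ⟨st'.head, hs', rooms', doors', st'.d, ts', st'.rmd⟩
            ∧ (rest ≠ [] → hs' = hs ∧ ts' = ts)

def AltsP (md : Int) (f : Nat) : Prop :=
  ∀ (cs : List Char) (snap : Pt × Int) (rmd : PySem.Set Pt) (d : Nat),
    okPat cs (d + 1) = true → 2 * cs.length + 2 ≤ f →
    ∃ rest st', runAlts md f cs snap rmd = some (rest, st')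
      ∧ rest.length ≤ cs.length
      ∧ okPat rest d = true
      ∧ (rest = [] ∨ (d ≠ 0 ∧ ∃ r, rest = ')' :: r ∨ rest = '|' :: r))
      ∧ ∀ (hs : List Pt) (ts : List Int) (rooms doors : PySem.Set Pt),
          ∃ rooms' doors' hs' ts',
            runA md cs ⟨snap.1, hs ++ [snap.1], rooms, doors, snap.2, ts ++ [snap.2], rmd⟩
              = runA md rest ⟨st'.head, hs', rooms', doors', st'.d, ts', st'.rmd⟩
            ∧ (rest ≠ [] → hs' = hs ∧ ts' = ts)

theorem seq_alts_sim (md : Int) : ∀ f : Nat, SeqP md f ∧ AltsP md f := by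
  intro f
  induction f with
  | zero => constructor <;> (intro cs; intros; omega)
  | succ f ih =>
    obtain ⟨ihS, ihA⟩ := ih
    constructor
    · -- SeqP (f+1)
      intro cs st d hok hf
      cases cs with
      | nil =>
        exact ⟨[], st, by simp [runB], by simp, rfl, Or.inl rfl,
          fun hs ts rooms doors => ⟨rooms, doors, hs, ts, rfl, fun h => absurd rfl h⟩⟩
      | cons c cs' =>
        simp only [okPat] at hok
        by_cases hmv : c = 'N' ∨ c = 'S' ∨ c = 'W' ∨ c = 'E'
        · rw [if_pos hmv] at hok
          have hm : isMove c = true := by rcases hmv with rfl | rfl | rfl | rfl <;> rfl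
          obtain ⟨rest, st', hrun, hlen, hokr, hdisj, hsim⟩ :=
            ihS cs' ⟨(st.head.1 + (delta c).1, st.head.2 + (delta c).2), st.d + 1,
                     if st.d + 1 ≥ md then
                       PySem.Set.add st.rmd (st.head.1 + (delta c).1, st.head.2 + (delta c).2)
                     else st.rmd⟩
              d hok (by simp at hf; omega)
          refine ⟨rest, st', ?_, by simp; omega, hokr, hdisj, ?_⟩
          · show runB md (f + 1) (c :: cs') st = some (rest, st')
            simpa [runB, hm] using hrun
          · intro hs ts rooms doors
            obtain ⟨rooms', doors', hs', ts', heq, hpres⟩ :=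
              hsim hs ts
                (PySem.Set.add rooms (st.head.1 + (delta c).1, st.head.2 + (delta c).2))
                (PySem.Set.add doors (doorA c st.head))
            refine ⟨rooms', doors', hs', ts', ?_, hpres⟩
            have hstep := stepA_move md c st.head hs rooms doors st.d ts st.rmd hmv
            simp only [runA, hstep]
            exact heq
        · rw [if_neg hmv] at hok
          have hm : isMove c = false := by simp [isMove]; tauto
          by_cases hpo : c = '('
          · subst hpo
            rw [if_pos rfl] at hok
            obtain ⟨rest, st', hrun, hlen, hokr, hdisj, hsim⟩ :=
              ihA cs' (st.head, st.d) st.rmd d hok (by simp at hf; omega)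
            refine ⟨rest, st', ?_, by simp; omega, hokr, hdisj, ?_⟩
            · show runB md (f + 1) ('(' :: cs') st = some (rest, st')
              simpa [runB] using hrun
            · intro hs ts rooms doors
              obtain ⟨rooms', doors', hs', ts', heq, hpres⟩ := hsim hs ts rooms doors
              refine ⟨rooms', doors', hs', ts', ?_, hpres⟩
              simp only [runA, stepA_open]
              exact heq
          · rw [if_neg hpo] at hok
            have hstop : runB md (f + 1) (c :: cs') st = some (c :: cs', st) := by
              simp [runB, hm, hpo]
            by_cases hcl : c = ')'
            · subst hcl
              rw [if_pos rfl] at hok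
              simp only [Bool.and_eq_true, bne_iff_ne, ne_eq] at hok
              refine ⟨')' :: cs', st, hstop, le_refl _, ?_, Or.inr ⟨hok.1, cs', Or.inl rfl⟩,
                fun hs ts rooms doors => ⟨rooms, doors, hs, ts, rfl, fun _ => ⟨rfl, rfl⟩⟩⟩
              simp [okPat, hok.1, hok.2]
            · rw [if_neg hcl] at hok
              by_cases hba : c = '|'
              · subst hba
                rw [if_pos rfl] at hok
                simp only [Bool.and_eq_true, bne_iff_ne, ne_eq] at hok
                refine ⟨'|' :: cs', st, hstop, le_refl _, ?_, Or.inr ⟨hok.1, cs', Or.inr rfl⟩,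
                  fun hs ts rooms doors => ⟨rooms, doors, hs, ts, rfl, fun _ => ⟨rfl, rfl⟩⟩⟩
                simp [okPat, hok.1, hok.2]
              · rw [if_neg hba] at hok
                exact absurd hok (by simp)
    · -- AltsP (f+1)
      intro cs snap rmd d hok hf
      obtain ⟨rest₁, st₁, hrun₁, hlen₁, hokr₁, hdisj₁, hsim₁⟩ :=
        ihS cs ⟨snap.1, snap.2, rmd⟩ (d + 1) hok (by omega)
      rcases hdisj₁ with hnil | ⟨_, r, hr | hr⟩
      · subst hnil
        refine ⟨[], st₁, ?_, by omega, rfl, Or.inl rfl, ?_⟩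
        · simp [runAlts, hrun₁]
        · intro hs ts rooms doors
          obtain ⟨rooms', doors', hs', ts', heq, _⟩ :=
            hsim₁ (hs ++ [snap.1]) (ts ++ [snap.2]) rooms doors
          exact ⟨rooms', doors', hs', ts', heq, fun h => absurd rfl h⟩
      · -- rest₁ = ')' :: r
        subst hr
        simp [okPat] at hokr₁
        have hokr : okPat r d = true := hokr₁
        have hlr : r.length + 1 ≤ cs.length := by
          simpa using hlen₁
        obtain ⟨rest', st', hrun', hlen', hokr', hdisj', hsim'⟩ :=
          ihS r st₁ d hokr (by omega)
        refine ⟨rest', st', ?_, by omega, hokr', hdisj', ?_⟩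
        · simp [runAlts, hrun₁]
          exact hrun'
        · intro hs ts rooms doors
          obtain ⟨rooms₁, doors₁, hs₁, ts₁, heq₁, hpres₁⟩ :=
            hsim₁ (hs ++ [snap.1]) (ts ++ [snap.2]) rooms doors
          obtain ⟨hhs₁, hts₁⟩ := hpres₁ (by simp)
          subst hhs₁; subst hts₁
          obtain ⟨rooms', doors', hs', ts', heq', hpres'⟩ := hsim' hs ts rooms₁ doors₁
          refine ⟨rooms', doors', hs', ts', ?_, hpres'⟩
          rw [heq₁]
          simp only [runA, stepA_close]
          exact heq'
      · -- rest₁ = '|' :: r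
        subst hr
        simp [okPat] at hokr₁
        have hlr : r.length + 1 ≤ cs.length := by
          simpa using hlen₁
        obtain ⟨rest', st', hrun', hlen', hokr', hdisj', hsim'⟩ :=
          ihA r snap st₁.rmd d hokr₁ (by omega)
        refine ⟨rest', st', ?_, by omega, hokr', hdisj', ?_⟩
        · simp [runAlts, hrun₁]
          exact hrun'
        · intro hs ts rooms doors
          obtain ⟨rooms₁, doors₁, hs₁, ts₁, heq₁, hpres₁⟩ :=
            hsim₁ (hs ++ [snap.1]) (ts ++ [snap.2]) rooms doors
          obtain ⟨hhs₁, hts₁⟩ := hpres₁ (by simp)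
          subst hhs₁; subst hts₁
          obtain ⟨rooms', doors', hs', ts', heq', hpres'⟩ := hsim' hs ts rooms₁ doors₁
          refine ⟨rooms', doors', hs', ts', ?_, hpres'⟩
          rw [heq₁]
          simp only [runA, stepA_bar]
          exact heq'

theorem walk_paths_spec : Claim_equal_walk_paths := by
  intro pattern md _ hpre
  show walk_paths pattern md = walk_paths_alt pattern md
  unfold walk_paths walk_paths_alt
  set cs := PySem.List.slice pattern.toList (some 1) (some (-1))
  have hpre' : okPat cs 0 = true := hpre
  obtain ⟨rest, st', hrun, _, _, hdisj, hsim⟩ :=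
    (seq_alts_sim md (2 * cs.length + 2)).1 cs ⟨(0, 0), 0, PySem.Set.empty⟩ 0 hpre' (by omega)
  have hrest : rest = [] := by
    rcases hdisj with h | ⟨h0, _⟩
    · exact h
    · exact absurd rfl h0
  subst hrest
  obtain ⟨rooms', doors', hs', ts', heq, _⟩ :=
    hsim [] [] (PySem.Set.ofList [(0, 0)]) PySem.Set.empty
  have heq' : runA md cs
      ⟨(0, 0), [], PySem.Set.ofList [(0, 0)], PySem.Set.empty, 0, [], PySem.Set.empty⟩ =
      some ⟨st'.head, hs', rooms', doors', st'.d, ts', st'.rmd⟩ := heq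
  simp only [heq', hrun]
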